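-- pv_equiv track=rewrite | github.com/qeedquan/challenges | codegolf/zipper-multiplication.py | zipmul
-- ===== SOURCE A (Python) =====
-- def sign(x):
--     if x < 0:
--         return -1
--     return 1
--
-- def intjoin(a):
--     if len(a) == 0:
--         return 0
--
--     s = ""
--     for v in a:
--         t = str(v)
--         if len(t) == 1:
--             t = '0' + t
--         s += t
--     return int(s)
--
-- def zipmul(x, y):
--     s0 = sign(x)
--     s1 = sign(y)
--     n0 = abs(x)
--     n1 = abs(y)
--
--     v = []
--     while n0 > 0 and n1 > 0:
--         v.append((n0 % 10) * (n1 % 10))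
--         n0 //= 10
--         n1 //= 10
--
--     return intjoin(v[::-1]) * s0 * s1
-- ===== SOURCE B (Python) =====
-- def zipmul(x, y):
--     sign = (1 if x >= 0 else -1) * (1 if y >= 0 else -1)
--     pairs = zip(str(abs(x))[::-1], str(abs(y))[::-1])
--     blocks = ["%02d" % ((ord(a) - 48) * (ord(b) - 48)) for a, b in pairs]
--     return sign * int("".join(reversed(blocks)))
-- ===== Notes on version B (the rewrite author's own statement) =====
-- stated objective: idiomatic
-- what changed: Replaces A's arithmetic digit-extraction while-loop plus list reversal and string-rebuilding intjoin helper with a single zip over the reversed decimal string representations, formatting each digit product with %02d and joining once.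
import Mathlib
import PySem

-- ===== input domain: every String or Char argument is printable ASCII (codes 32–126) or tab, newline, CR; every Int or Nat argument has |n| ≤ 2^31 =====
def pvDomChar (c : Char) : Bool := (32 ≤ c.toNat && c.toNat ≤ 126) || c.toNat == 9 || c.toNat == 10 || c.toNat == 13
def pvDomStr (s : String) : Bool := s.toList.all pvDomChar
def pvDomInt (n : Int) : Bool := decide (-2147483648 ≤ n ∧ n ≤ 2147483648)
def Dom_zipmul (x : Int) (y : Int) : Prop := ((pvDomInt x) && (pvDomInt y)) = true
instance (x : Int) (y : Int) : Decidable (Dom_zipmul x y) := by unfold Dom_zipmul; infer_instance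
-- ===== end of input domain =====

-- B replaces A's arithmetic digit-extraction loop + intjoin string rebuild with one zip over the
-- reversed decimal strings and a single join (objective: idiomatic; same exact return value).

-- ===== PORT A =====
def signA (x : Int) : Int := if x < 0 then -1 else 1

-- intjoin: builds the string s by appending str(v) padded to 2 chars, then int(s).
-- int(s) ported as PySem.Int.ofChars? (s is always a nonempty digit string here, so it never raises).
def intjoin (a : List Int) : Int :=
  if a.length = 0 then 0
  else
    let s := a.foldl (fun s v =>
      let t := PySem.Int.toChars v
      let t := if t.length = 1 then '0' :: t else t
      s ++ t) ([] : List Char)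
    (PySem.Int.ofChars? s).getD 0

-- the while loop of zipmul: while n0 > 0 and n1 > 0: v.append((n0%10)*(n1%10)); n0//=10; n1//=10
def zloop (n0 n1 : Int) (v : List Int) : List Int :=
  if h : 0 < n0 ∧ 0 < n1 then
    zloop (PySem.Int.floordiv n0 10) (PySem.Int.floordiv n1 10)
          (v ++ [PySem.Int.mod n0 10 * PySem.Int.mod n1 10])
  else v
termination_by n0.toNat
decreasing_by
  rw [PySem.Int.floordiv_eq_ediv_of_pos (by norm_num : (0:Int) < 10)]
  omega

def zipmul (x : Int) (y : Int) : Int :=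
  let s0 := signA x
  let s1 := signA y
  let n0 := |x|
  let n1 := |y|
  let v := zloop n0 n1 []
  intjoin ((PySem.List.slice? v none none (-1)).getD []) * s0 * s1   -- v[::-1]

-- ===== PORT B =====
-- "%02d" % p  (exact for 0 ≤ p, the only values reaching it)
def fmt2 (p : Int) : List Char :=
  if p < 10 then '0' :: PySem.Int.toChars p else PySem.Int.toChars p

def zipmul_alt (x : Int) (y : Int) : Int :=
  let sign := (if 0 ≤ x then (1 : Int) else -1) * (if 0 ≤ y then (1 : Int) else -1)
  -- str(abs(x))[::-1]: slicing with step -1 is reversal (PySem.List.slice?_none_none_neg_one)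
  let pairs := List.zip (PySem.Int.toChars |x|).reverse (PySem.Int.toChars |y|).reverse
  let blocks := pairs.map (fun ab => fmt2 (((ab.1.toNat : Int) - 48) * ((ab.2.toNat : Int) - 48)))
  sign * (PySem.Int.ofChars? (PySem.Chars.join [] blocks.reverse)).getD 0

-- ===== PRECONDITION & SPEC =====
def Spec_zipmul (x : Int) (y : Int) (out : Int) : Prop := out = zipmul_alt x y
instance (x : Int) (y : Int) (out : Int) : Decidable (Spec_zipmul x y out) := by unfold Spec_zipmul; infer_instance

-- ===== CLAIM (what is proved, stated in full; the proofs are below) =====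
def Claim_equal_zipmul : Prop := ∀ (x : Int) (y : Int), Dom_zipmul x y → Spec_zipmul x y (zipmul x y)

-- ===== LEMMAS AND PROOFS =====

-- little-endian decimal digit characters of a natural number
def dchars (n : Nat) : List Char :=
  if h : n < 10 then [Nat.digitChar n] else Nat.digitChar (n % 10) :: dchars (n / 10)
termination_by n
decreasing_by omega

-- little-endian list of digit products, exactly what A's while loop collects
def dprods (a b : Nat) : List Int :=
  if h : 0 < a ∧ 0 < b then
    (((a % 10 : Nat) : Int) * ((b % 10 : Nat) : Int)) :: dprods (a / 10) (b / 10)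
  else []
termination_by a
decreasing_by omega

lemma toDigits_of_lt (n : Nat) (h : n < 10) : Nat.toDigits 10 n = [n.digitChar] := by
  simp [Nat.toDigits, Nat.toDigitsCore, Nat.div_eq_of_lt h, Nat.mod_eq_of_lt h]

lemma toDigits_reverse_eq_dchars (n : Nat) : (Nat.toDigits 10 n).reverse = dchars n := by
  induction n using Nat.strong_induction_on with
  | _ n ih =>
    by_cases h : n < 10
    · rw [toDigits_of_lt n h, dchars]; simp [h]
    · rw [Nat.toDigits_of_base_le (by norm_num) (by omega : 10 ≤ n), dchars]
      simp [h, ih (n / 10) (by omega)]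

lemma dchars_ne_nil (n : Nat) : dchars n ≠ [] := by
  rw [dchars]; split <;> simp

lemma dchars_lt (n : Nat) (h : n < 10) : dchars n = [Nat.digitChar n] := by
  rw [dchars, dif_pos h]

lemma dchars_ge (n : Nat) (h : ¬ n < 10) :
    dchars n = Nat.digitChar (n % 10) :: dchars (n / 10) := by
  rw [dchars, dif_neg h]

lemma dprods_pos (a b : Nat) (h : 0 < a ∧ 0 < b) :
    dprods a b = (((a % 10 : Nat) : Int) * ((b % 10 : Nat) : Int)) :: dprods (a / 10) (b / 10) := by
  rw [dprods, dif_pos h]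

lemma dprods_neg (a b : Nat) (h : ¬ (0 < a ∧ 0 < b)) : dprods a b = [] := by
  rw [dprods, dif_neg h]

lemma dchars_length_eq_one_iff (n : Nat) : (dchars n).length = 1 ↔ n < 10 := by
  by_cases h : n < 10
  · simp [dchars_lt n h, h]
  · rw [dchars_ge n h]
    constructor
    · intro hl
      have h0 : (dchars (n / 10)).length = 0 := by simpa using hl
      exact absurd (List.length_eq_zero_iff.mp h0) (dchars_ne_nil (n / 10))
    · intro hl; exact absurd hl h

lemma toChars_natCast (p : Nat) : PySem.Int.toChars (p : Int) = Nat.toDigits 10 p := by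
  simp [PySem.Int.toChars]

lemma digitChar_val (d : Nat) (h : d < 10) : ((Nat.digitChar d).toNat : Int) - 48 = (d : Int) := by
  interval_cases d <;> decide

-- A's while loop collects exactly dprods
lemma zloop_eq (a b : Nat) (v : List Int) : zloop (a : Int) (b : Int) v = v ++ dprods a b := by
  induction a using Nat.strong_induction_on generalizing b v with
  | _ a ih =>
    rw [zloop]
    by_cases h : 0 < a ∧ 0 < b
    · have h' : 0 < (a : Int) ∧ 0 < (b : Int) := by exact_mod_cast h
      rw [dif_pos h', dprods_pos a b h]
      rw [show ((10 : Int)) = ((10 : Nat) : Int) by norm_num]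
      rw [PySem.Int.floordiv_natCast, PySem.Int.floordiv_natCast,
          PySem.Int.mod_natCast, PySem.Int.mod_natCast]
      rw [ih (a / 10) (by omega) (b / 10)]
      simp
    · have h' : ¬ (0 < (a : Int) ∧ 0 < (b : Int)) := by
        intro hc; exact h (by exact_mod_cast hc)
      rw [dif_neg h', dprods_neg a b h]; simp

-- B's zipped digit products are the same list
lemma zip_dchars_eq_dprods (a b : Nat) (ha : 0 < a) (hb : 0 < b) :
    (List.zip (dchars a) (dchars b)).map
      (fun ab => (((ab.1.toNat : Int) - 48) * ((ab.2.toNat : Int) - 48))) = dprods a b := by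
  induction a using Nat.strong_induction_on generalizing b with
  | _ a ih =>
    rw [dprods_pos a b ⟨ha, hb⟩]
    by_cases h1 : a < 10 <;> by_cases h2 : b < 10
    · rw [dchars_lt a h1, dchars_lt b h2, dprods_neg _ _ (by omega)]
      simp [List.zip, digitChar_val a h1, digitChar_val b h2,
            Nat.mod_eq_of_lt h1, Nat.mod_eq_of_lt h2]
    · rw [dchars_lt a h1, dchars_ge b h2, dprods_neg _ _ (by omega)]
      simp [List.zip, digitChar_val a h1, digitChar_val (b % 10) (by omega),
            Nat.mod_eq_of_lt h1]
    · rw [dchars_ge a h1, dchars_lt b h2, dprods_neg _ _ (by omega)]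
      simp [List.zip, digitChar_val (a % 10) (by omega), digitChar_val b h2,
            Nat.mod_eq_of_lt h2]
    · rw [dchars_ge a h1, dchars_ge b h2]
      simp only [List.zip_cons_cons, List.map_cons]
      rw [digitChar_val (a % 10) (by omega), digitChar_val (b % 10) (by omega),
          ih (a / 10) (by omega) (b / 10) (by omega) (by omega)]

-- every element of dprods is a natural number cast
lemma dprods_mem (v : Int) (a b : Nat) (hv : v ∈ dprods a b) : ∃ p : Nat, v = (p : Int) := by
  induction a using Nat.strong_induction_on generalizing b with
  | _ a ih =>
    by_cases h : 0 < a ∧ 0 < b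
    · rw [dprods_pos a b h] at hv
      rcases List.mem_cons.mp hv with h' | h'
      · exact ⟨(a % 10) * (b % 10), by push_cast [h']; ring⟩
      · exact ih (a / 10) (by omega) (b / 10) h'
    · rw [dprods_neg a b h] at hv; simp at hv

-- A's padding agrees with B's %02d on natural values
lemma pad_eq_fmt2 (p : Nat) :
    (if (PySem.Int.toChars (p : Int)).length = 1 then '0' :: PySem.Int.toChars (p : Int)
     else PySem.Int.toChars (p : Int)) = fmt2 (p : Int) := by
  have hlen : (PySem.Int.toChars (p : Int)).length = (dchars p).length := by
    rw [toChars_natCast, ← toDigits_reverse_eq_dchars, List.length_reverse]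
  have h10 : ((p : Int) < 10) ↔ p < 10 := by exact_mod_cast Iff.rfl
  rw [fmt2, hlen]
  by_cases h : p < 10
  · rw [if_pos ((dchars_length_eq_one_iff p).mpr h), if_pos (h10.mpr h)]
  · rw [if_neg (fun hc => h ((dchars_length_eq_one_iff p).mp hc)),
        if_neg (fun hc => h (h10.mp hc))]

lemma join_nil_eq_flatten (parts : List (List Char)) :
    PySem.Chars.join [] parts = parts.flatten := by
  simp only [PySem.Chars.join, List.intercalate]
  induction parts with
  | nil => rfl
  | cons h t ih =>
    cases t with
    | nil => rfl
    | cons h2 t2 => simp_all [List.intersperse]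

lemma sign_eq (x : Int) : (if 0 ≤ x then (1 : Int) else -1) = signA x := by
  rw [signA]; by_cases h : x < 0
  · rw [if_neg (by omega), if_pos h]
  · rw [if_pos (by omega), if_neg h]

-- the string A's intjoin builds is the string B joins
lemma strings_eq (a b : Nat) :
    ((dprods a b).reverse.foldl (fun s v =>
        s ++ (if (PySem.Int.toChars v).length = 1 then '0' :: PySem.Int.toChars v
              else PySem.Int.toChars v)) ([] : List Char))
    = PySem.Chars.join [] (((dprods a b).map (fun v => fmt2 v)).reverse) := by
  rw [PySem.List.foldl_append_eq_flatMap
        (g := fun v => (if (PySem.Int.toChars v).length = 1 then '0' :: PySem.Int.toChars v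
              else PySem.Int.toChars v))]
  rw [join_nil_eq_flatten, ← List.map_reverse, List.flatMap_def]
  simp only [List.nil_append]
  congr 1
  apply List.map_congr_left
  intro v hv
  obtain ⟨p, rfl⟩ := dprods_mem v a b (List.mem_reverse.mp hv)
  exact pad_eq_fmt2 p

lemma intjoin_eq (a b : Nat) (hne : dprods a b ≠ []) :
    intjoin ((dprods a b).reverse)
      = (PySem.Int.ofChars?
          (PySem.Chars.join [] (((dprods a b).map (fun v => fmt2 v)).reverse))).getD 0 := by
  simp only [intjoin]
  rw [if_neg (by simpa using hne), strings_eq]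

-- ===== VERDICT (by name: the statement is the Claim_ definition above) =====
theorem zipmul_spec : Claim_equal_zipmul := by
  intro x y _
  unfold Spec_zipmul
  show zipmul x y = zipmul_alt x y
  simp only [zipmul, zipmul_alt, PySem.List.slice?_none_none_neg_one, Option.getD_some,
             Int.abs_eq_natAbs, sign_eq]
  rw [zloop_eq, List.nil_append, toChars_natCast, toChars_natCast,
      toDigits_reverse_eq_dchars, toDigits_reverse_eq_dchars]
  by_cases h : 0 < x.natAbs ∧ 0 < y.natAbs
  · have hne : dprods x.natAbs y.natAbs ≠ [] := by
      rw [dprods_pos _ _ h]; simp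
    have hb2 : (List.zip (dchars x.natAbs) (dchars y.natAbs)).map
        (fun ab => fmt2 (((ab.1.toNat : Int) - 48) * ((ab.2.toNat : Int) - 48)))
        = (dprods x.natAbs y.natAbs).map (fun v => fmt2 v) := by
      rw [← zip_dchars_eq_dprods _ _ h.1 h.2, List.map_map]; rfl
    rw [intjoin_eq _ _ hne, hb2]
    ring
  · rw [dprods_neg _ _ h]
    have hA : intjoin (([] : List Int).reverse) = 0 := by simp [intjoin]
    rw [hA]
    have efmt : fmt2 0 = ['0', '0'] := by decide
    have eparse : PySem.Int.ofChars? ['0', '0'] = some 0 := by decide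
    rcases Nat.eq_zero_or_pos x.natAbs with ha | ha
    · rw [ha, show dchars 0 = ['0'] from by rw [dchars_lt 0 (by omega)]; decide]
      rcases hd : dchars y.natAbs with _ | ⟨c, t⟩
      · exact absurd hd (dchars_ne_nil _)
      · simp [List.zip, efmt, eparse]
    · have hb : y.natAbs = 0 := by omega
      rw [hb, show dchars 0 = ['0'] from by rw [dchars_lt 0 (by omega)]; decide]
      rcases hd : dchars x.natAbs with _ | ⟨c, t⟩
      · exact absurd hd (dchars_ne_nil _)
      · simp [List.zip, efmt, eparse]
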